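-- pv_equiv track=rewrite | github.com/ed-donner/llm_engineering | week4/community-contributions/docstring_unity_test_tool/src/unit_test_core/unit_test_writer.py | normalize_imports
-- ===== SOURCE A (Python) =====
-- from typing import List, Dict
-- from collections import defaultdict
--
-- def normalize_imports(import_lines: List[str]) -> List[str]:
--     """
--     Normalizes a list of import statements by grouping them into 'import' and 'from ... import' formats, ensuring no duplicates.
--
--     Args:
--       import_lines (List[str]): A list of import lines to normalize.
--
--     Returns:
--       List[str]: A sorted list of normalized import lines.
--     """
--     import_map = defaultdict(set)  # module -> set of names
--     raw_imports = set()
--     for line in import_lines: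
--         line = line.strip()
--         if line.startswith("import "):
--             raw_imports.add(line)
--         elif line.startswith("from "):
--             parts = line.split()
--             module = parts[1]
--             names = parts[3].split(",")
--             for n in names:
--                 import_map[module].add(n.strip())
--     normalized = list(raw_imports)
--     for module, names in import_map.items():
--         normalized.append(f"from {module} import {', '.join(sorted(names))}")
--     return sorted(normalized)
-- ===== SOURCE B (Python) =====
-- def normalize_imports(import_lines):
--     """
--     Normalizes a list of import statements by grouping them into 'import' and
--     'from ... import' formats, ensuring no duplicates.
--
--     Staged declarative version: strip all lines once, collect the raw import
--     lines as a set comprehension, collect all (module, name) pairs as one flat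
--     set comprehension (same parts[1] / parts[3].split(',') parsing as the
--     original), then assemble one 'from' line per distinct module.
--     """
--     stripped = [line.strip() for line in import_lines]
--     raw = set(l for l in stripped if l.startswith("import "))
--     pairs = {(l.split()[1], n.strip())
--              for l in stripped if l.startswith("from ")
--              for n in l.split()[3].split(",")}
--     modules = sorted({m for m, _ in pairs})
--     from_lines = ["from {} import {}".format(
--                       m, ", ".join(sorted(n for m2, n in pairs if m2 == m)))
--                   for m in modules]
--     return sorted(list(raw) + from_lines)
-- ===== Notes on version B (the rewrite author's own statement) =====
-- stated objective: alternative
-- what changed: B replaces A's single imperative pass that maintains a defaultdict(set) of names per module (plus a raw-line set) by staged declarative passes: strip all lines once, collect raw import lines with a set comprehension, collect all (module, name) pairs into one flat set comprehension with the same parts[1]/parts[3].split(',') parsing, then assemble one 'from' line per sorted distinct module by filtering the pair set; Pre_ excludes 'from'-lines with fewer than 4 whitespace tokens, where both A and B raise IndexError.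
import Mathlib
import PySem

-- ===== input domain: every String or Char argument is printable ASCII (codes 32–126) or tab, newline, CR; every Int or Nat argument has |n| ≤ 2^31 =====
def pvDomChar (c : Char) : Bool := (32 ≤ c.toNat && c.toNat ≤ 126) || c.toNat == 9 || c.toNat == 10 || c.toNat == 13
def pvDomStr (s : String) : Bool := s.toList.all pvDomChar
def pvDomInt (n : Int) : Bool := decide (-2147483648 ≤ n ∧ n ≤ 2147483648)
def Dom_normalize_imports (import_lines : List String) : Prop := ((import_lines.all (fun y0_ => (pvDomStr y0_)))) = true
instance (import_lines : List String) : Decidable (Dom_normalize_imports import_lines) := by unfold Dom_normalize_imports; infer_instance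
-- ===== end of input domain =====

-- B replaces A's single fold over a dict-of-sets by staged declarative passes (strip, filter,
-- flatMap into a flat pair set, per-module assembly) — an alternative decomposition, not faster.


-- ===== PORT A =====

-- one iteration of A's loop: state = (import_map, raw_imports)
def niStepA (st : PySem.Dict String (PySem.Set String) × PySem.Set String) (line : String) :
    PySem.Dict String (PySem.Set String) × PySem.Set String :=
  let l := PySem.Str.strip line
  if PySem.Str.startswith l "import " then
    (st.1, PySem.Set.add st.2 l)
  else if PySem.Str.startswith l "from " then
    let parts := PySem.Str.split₀ l
    let module := PySem.List.pyGetD parts 1 ""          -- parts[1]; total form, IndexError excluded by Pre_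
    let names := (PySem.Str.split? (PySem.List.pyGetD parts 3 "") ",").getD []   -- parts[3].split(",")
    (names.foldl (fun d n => d.modify module [] (fun s => PySem.Set.add s (PySem.Str.strip n))) st.1, st.2)
  else st

def normalize_imports (import_lines : List String) : List String :=
  let st := import_lines.foldl niStepA (PySem.Dict.empty, PySem.Set.empty)
  let normalized := st.2 ++ st.1.items.map
    (fun p => "from " ++ p.1 ++ " import " ++
      PySem.Str.join ", " (PySem.List.sorted p.2 (fun x => x) false))
  PySem.List.sorted normalized (fun x => x) false

-- ===== PORT B =====

-- the (module, name) pairs contributed by one stripped 'from' line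
-- ((l.split()[1], n.strip()) for n in l.split()[3].split(","))
def niPairsOf (l : String) : List (String × String) :=
  let parts := PySem.Str.split₀ l
  ((PySem.Str.split? (PySem.List.pyGetD parts 3 "") ",").getD []).map
    (fun n => (PySem.List.pyGetD parts 1 "", PySem.Str.strip n))

def normalize_imports_alt (import_lines : List String) : List String :=
  let stripped := import_lines.map PySem.Str.strip
  let raw := PySem.Set.ofList (stripped.filter (fun l => PySem.Str.startswith l "import "))
  let pairs := PySem.Set.ofList
    ((stripped.filter (fun l => PySem.Str.startswith l "from ")).flatMap niPairsOf)
  let modules := PySem.List.sorted (PySem.Set.ofList (pairs.map Prod.fst)) (fun x => x) false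
  let from_lines := modules.map (fun m =>
    "from " ++ m ++ " import " ++
      PySem.Str.join ", " (PySem.List.sorted
        ((pairs.filter (fun p => p.1 == m)).map Prod.snd) (fun x => x) false))
  PySem.List.sorted (raw ++ from_lines) (fun x => x) false

-- ===== PRECONDITION & SPEC =====
-- Pre_ excludes exactly the inputs on which Python A raises IndexError: a stripped line that
-- starts with "from " but has fewer than 4 whitespace-separated tokens (parts[3] missing).
def Pre_normalize_imports (import_lines : List String) : Prop :=
  ∀ l ∈ import_lines,
    PySem.Str.startswith (PySem.Str.strip l) "from " = true →
    4 ≤ (PySem.Str.split₀ (PySem.Str.strip l)).length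
instance (import_lines : List String) : Decidable (Pre_normalize_imports import_lines) := by
  unfold Pre_normalize_imports; infer_instance

def pvWitness_normalize_imports : List String :=
  ["import os", "from a import b,c", "  from a import d", "x = 1", "import os"]

def Spec_normalize_imports (import_lines : List String) (out : List String) : Prop := out = normalize_imports_alt import_lines
instance (import_lines : List String) (out : List String) : Decidable (Spec_normalize_imports import_lines out) := by unfold Spec_normalize_imports; infer_instance

-- ===== CLAIM (what is proved, stated in full; the proofs are below) =====
def Claim_equal_normalize_imports : Prop := ∀ (import_lines : List String), Dom_normalize_imports import_lines → Pre_normalize_imports import_lines → Spec_normalize_imports import_lines (normalize_imports import_lines)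

-- ===== LEMMAS AND PROOFS =====

-- a line starting with "import " does not start with "from "
theorem import_not_from (cs : List Char)
    (h : PySem.Chars.startswith cs ['i','m','p','o','r','t',' '] = true) :
    PySem.Chars.startswith cs ['f','r','o','m',' '] = false := by
  rw [PySem.Chars.startswith_iff] at h
  obtain ⟨t1, h1⟩ := h
  by_contra hc
  rw [Bool.not_eq_false, PySem.Chars.startswith_iff] at hc
  obtain ⟨t2, h2⟩ := hc
  rw [← h1] at h2
  simp at h2

-- the flat pair list B's comprehension traverses
def niPL (lines : List String) : List (String × String) :=
  ((lines.map PySem.Str.strip).filter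
    (fun l => PySem.Str.startswith l "from ")).flatMap niPairsOf

-- A's dict-only structural invariant
def dInv (d : PySem.Dict String (PySem.Set String)) : Prop :=
  d.keys.Nodup ∧ (∀ m, d.contains m = true → d.getD m [] ≠ []) ∧ (∀ m, (d.getD m []).Nodup)

theorem dInv_modify (d : PySem.Dict String (PySem.Set String)) (m x : String) (h : dInv d) :
    dInv (d.modify m [] (fun s => PySem.Set.add s x)) := by
  obtain ⟨hk, hne, hnd⟩ := h
  refine ⟨?_, ?_, ?_⟩
  · rw [PySem.Dict.keys_modify]
    exact PySem.Dict.nodup_keys_insert _ _ _ hk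
  · intro m' hc
    rw [PySem.Dict.getD_modify]
    by_cases hmm : m' = m
    · rw [if_pos hmm]
      exact List.ne_nil_of_mem ((PySem.Set.mem_add _ _ _).mpr (Or.inr rfl))
    · rw [if_neg hmm]
      rw [PySem.Dict.contains_modify, Bool.or_eq_true, beq_iff_eq] at hc
      exact hne m' (hc.resolve_left hmm)
  · intro m'
    rw [PySem.Dict.getD_modify]
    by_cases hmm : m' = m
    · rw [if_pos hmm]; exact PySem.Set.nodup_add _ _ (hnd m)
    · rw [if_neg hmm]; exact hnd m'

theorem dInv_names (names : List String) (m : String)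
    (d : PySem.Dict String (PySem.Set String)) (h : dInv d) :
    dInv (names.foldl (fun d n => d.modify m [] (fun s => PySem.Set.add s (PySem.Str.strip n))) d) := by
  induction names generalizing d with
  | nil => exact h
  | cons n t ih => exact ih _ (dInv_modify _ _ _ h)

theorem dInv_fold (lines : List String) (d : PySem.Dict String (PySem.Set String))
    (r : PySem.Set String) (h : dInv d) :
    dInv (lines.foldl niStepA (d, r)).1 := by
  induction lines generalizing d r with
  | nil => exact h
  | cons l t ih =>
    simp only [List.foldl_cons]
    by_cases h1 : PySem.Chars.startswith (PySem.Chars.strip l.toList) ['i','m','p','o','r','t',' '] = true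
    · rw [show niStepA (d, r) l = (d, PySem.Set.add r (PySem.Str.strip l)) by simp [niStepA, h1]]
      exact ih _ _ h
    · by_cases h2 : PySem.Chars.startswith (PySem.Chars.strip l.toList) ['f','r','o','m',' '] = true
      · rw [show niStepA (d, r) l =
              (((PySem.Str.split? (PySem.List.pyGetD (PySem.Str.split₀ (PySem.Str.strip l)) 3 "") ",").getD []).foldl
                 (fun d n => d.modify (PySem.List.pyGetD (PySem.Str.split₀ (PySem.Str.strip l)) 1 "") []
                   (fun s => PySem.Set.add s (PySem.Str.strip n))) d, r) by
              simp [niStepA, h1, h2]]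
        exact ih _ _ (dInv_names _ _ _ h)
      · rw [show niStepA (d, r) l = (d, r) by simp [niStepA, h1, h2]]
        exact ih _ _ h

theorem dInv_empty : dInv PySem.Dict.empty := by
  refine ⟨by simp [PySem.Dict.keys_empty], ?_, ?_⟩
  · intro m hc; simp [PySem.Dict.contains_empty] at hc
  · intro m; simp [PySem.Dict.getD_empty]

-- membership after A's inner names loop
theorem modify_names_mem (names : List String) (m0 : String)
    (d : PySem.Dict String (PySem.Set String)) (m n : String) :
    n ∈ (names.foldl (fun d x => d.modify m0 [] (fun s => PySem.Set.add s (PySem.Str.strip x))) d).getD m [] ↔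
      n ∈ d.getD m [] ∨ ∃ x ∈ names, m = m0 ∧ n = PySem.Str.strip x := by
  induction names generalizing d with
  | nil => simp
  | cons x t ih =>
    rw [List.foldl_cons, ih]
    rw [PySem.Dict.getD_modify]
    by_cases hmm : m = m0
    · subst hmm
      rw [if_pos rfl, PySem.Set.mem_add]
      constructor
      · rintro (((hh | hh) | hh))
        · exact Or.inl hh
        · exact Or.inr ⟨x, List.mem_cons_self, rfl, hh⟩
        · obtain ⟨y, hy, _, hny⟩ := hh
          exact Or.inr ⟨y, List.mem_cons_of_mem _ hy, rfl, hny⟩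
      · rintro (hh | ⟨y, hy, _, hny⟩)
        · exact Or.inl (Or.inl hh)
        · rcases List.mem_cons.mp hy with rfl | hyt
          · exact Or.inl (Or.inr hny)
          · exact Or.inr ⟨y, hyt, rfl, hny⟩
    · rw [if_neg hmm]
      constructor
      · rintro (hh | ⟨y, hy, hm, hny⟩)
        · exact Or.inl hh
        · exact absurd hm hmm
      · rintro (hh | ⟨y, hy, hm, hny⟩)
        · exact Or.inl hh
        · exact absurd hm hmm

-- membership in A's dict after the whole loop = membership in B's flat pair list
-- parts[1] and parts[3].split(",") of a stripped from-line (proof-side abbreviations)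
def niModule (l : String) : String := PySem.List.pyGetD (PySem.Str.split₀ l) 1 ""
def niNames (l : String) : List String :=
  (PySem.Str.split? (PySem.List.pyGetD (PySem.Str.split₀ l) 3 "") ",").getD []

theorem niPairsOf_eq (l : String) :
    niPairsOf l = (niNames l).map (fun n => (niModule l, PySem.Str.strip n)) := rfl

theorem pairs_iff (M : String) (N : List String) (m n : String) :
    (m, n) ∈ N.map (fun x => (M, PySem.Str.strip x)) ↔
      ∃ x ∈ N, m = M ∧ n = PySem.Str.strip x := by
  simp only [List.mem_map]
  constructor
  · rintro ⟨x, hx, hxx⟩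
    exact ⟨x, hx, (congrArg Prod.fst hxx).symm, (congrArg Prod.snd hxx).symm⟩
  · rintro ⟨x, hx, rfl, rfl⟩
    exact ⟨x, hx, rfl⟩

-- membership in A's dict after the whole loop = membership in B's flat pair list
theorem dict_mem_fold (lines : List String) (d : PySem.Dict String (PySem.Set String))
    (r : PySem.Set String) (m n : String) :
    n ∈ (lines.foldl niStepA (d, r)).1.getD m [] ↔
      n ∈ d.getD m [] ∨ (m, n) ∈ niPL lines := by
  induction lines generalizing d r with
  | nil => simp [niPL]
  | cons l t ih =>
    simp only [List.foldl_cons]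
    by_cases h1 : PySem.Chars.startswith (PySem.Chars.strip l.toList) ['i','m','p','o','r','t',' '] = true
    · rw [show niStepA (d, r) l = (d, PySem.Set.add r (PySem.Str.strip l)) by simp [niStepA, h1],
          ih]
      have hf : PySem.Chars.startswith (PySem.Chars.strip l.toList) ['f','r','o','m',' '] = false :=
        import_not_from _ h1
      have : niPL (l :: t) = niPL t := by
        simp only [niPL, List.map_cons, List.filter_cons]
        rw [show (PySem.Str.startswith (PySem.Str.strip l) "from ") = false by simpa using hf]
        simp
      rw [this]
    · by_cases h2 : PySem.Chars.startswith (PySem.Chars.strip l.toList) ['f','r','o','m',' '] = true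
      · have hstep : niStepA (d, r) l =
            ((niNames (PySem.Str.strip l)).foldl
              (fun d x => d.modify (niModule (PySem.Str.strip l)) []
                (fun s => PySem.Set.add s (PySem.Str.strip x))) d, r) := by
          simp [niStepA, niNames, niModule, h1, h2]
        have hPL : niPL (l :: t) = niPairsOf (PySem.Str.strip l) ++ niPL t := by
          simp only [niPL, List.map_cons, List.filter_cons]
          rw [show (PySem.Str.startswith (PySem.Str.strip l) "from ") = true by simpa using h2]
          simp
        rw [hstep, ih, modify_names_mem, hPL, List.mem_append, niPairsOf_eq, pairs_iff, or_assoc]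
      · rw [show niStepA (d, r) l = (d, r) by simp [niStepA, h1, h2], ih]
        have : niPL (l :: t) = niPL t := by
          simp only [niPL, List.map_cons, List.filter_cons]
          rw [show (PySem.Str.startswith (PySem.Str.strip l) "from ") = false by
                simpa using h2]
          simp
        rw [this]

-- A's raw set is B's deduplicated filtered stripped list
theorem raw_fold (lines : List String) (d : PySem.Dict String (PySem.Set String))
    (r : PySem.Set String) :
    (lines.foldl niStepA (d, r)).2 =
      PySem.Set.update r ((lines.map PySem.Str.strip).filter
        (fun l => PySem.Str.startswith l "import ")) := by
  induction lines generalizing d r with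
  | nil => simp [PySem.Set.update]
  | cons l t ih =>
    simp only [List.foldl_cons, List.map_cons, List.filter_cons]
    by_cases h1 : PySem.Chars.startswith (PySem.Chars.strip l.toList) ['i','m','p','o','r','t',' '] = true
    · rw [show niStepA (d, r) l = (d, PySem.Set.add r (PySem.Str.strip l)) by simp [niStepA, h1],
          show (PySem.Str.startswith (PySem.Str.strip l) "import ") = true by simpa using h1,
          ih, if_pos rfl]
      rw [PySem.Set.update_cons]
    · rw [show (PySem.Str.startswith (PySem.Str.strip l) "import ") = false by simpa using h1]
      by_cases h2 : PySem.Chars.startswith (PySem.Chars.strip l.toList) ['f','r','o','m',' '] = true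
      · rw [show niStepA (d, r) l =
              (((PySem.Str.split? (PySem.List.pyGetD (PySem.Str.split₀ (PySem.Str.strip l)) 3 "") ",").getD []).foldl
                 (fun d n => d.modify (PySem.List.pyGetD (PySem.Str.split₀ (PySem.Str.strip l)) 1 "") []
                   (fun s => PySem.Set.add s (PySem.Str.strip n))) d, r) by
              simp [niStepA, h1, h2]]
        simpa using ih _ _
      · rw [show niStepA (d, r) l = (d, r) by simp [niStepA, h1, h2]]
        simpa using ih _ _

-- B's per-module name list has no duplicates
theorem names_nodup (pairs : List (String × String)) (hp : pairs.Nodup) (m : String) :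
    ((pairs.filter (fun p => p.1 == m)).map Prod.snd).Nodup := by
  refine (List.Nodup.filter _ hp).map_on ?_
  intro x hx y hy hxy
  rw [List.mem_filter] at hx hy
  have hx1 : x.1 = m := by simpa using hx.2
  have hy1 : y.1 = m := by simpa using hy.2
  exact Prod.ext (hx1.trans hy1.symm) hxy

-- membership in B's per-module name list
theorem names_mem (pairs : List (String × String)) (m n : String) :
    n ∈ (pairs.filter (fun p => p.1 == m)).map Prod.snd ↔ (m, n) ∈ pairs := by
  rw [List.mem_map]
  constructor
  · rintro ⟨p, hp, rfl⟩
    rw [List.mem_filter] at hp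
    obtain ⟨hp1, hp2⟩ := hp
    have : p.1 = m := by simpa using hp2
    rwa [← this]
  · intro hmn
    exact ⟨(m, n), List.mem_filter.mpr ⟨hmn, by simp⟩, rfl⟩

-- ===== VERDICT (by name: the statement is the Claim_ definition above) =====
theorem normalize_imports_spec : Claim_equal_normalize_imports := by
  intro lines _ _
  unfold Spec_normalize_imports
  simp only [normalize_imports, normalize_imports_alt]
  obtain ⟨hk, hne, hnd⟩ := dInv_fold lines PySem.Dict.empty PySem.Set.empty dInv_empty
  set dA := (lines.foldl niStepA (PySem.Dict.empty, PySem.Set.empty)).1 with hdA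
  set pairs := PySem.Set.ofList (niPL lines) with hpairs
  have hmem : ∀ m n, n ∈ dA.getD m [] ↔ (m, n) ∈ pairs := by
    intro m n
    have hdm := dict_mem_fold lines PySem.Dict.empty PySem.Set.empty m n
    rw [← hdA] at hdm
    rw [hpairs, PySem.Set.mem_ofList, hdm]
    simp [PySem.Dict.getD_empty]
  -- raw parts coincide as lists
  have hraw : (lines.foldl niStepA (PySem.Dict.empty, PySem.Set.empty)).2 =
      PySem.Set.ofList ((lines.map PySem.Str.strip).filter
        (fun l => PySem.Str.startswith l "import ")) := by
    rw [raw_fold]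
    rfl
  rw [hraw]
  rw [PySem.List.sorted_id_eq_sorted_id_iff_perm]
  apply List.Perm.append_left
  have hitems := PySem.Dict.items_eq_map_keys dA hk []
  rw [hitems, List.map_map]
  have hline : ∀ m : String,
      ((fun p : String × PySem.Set String => "from " ++ p.1 ++ " import " ++
          PySem.Str.join ", " (PySem.List.sorted p.2 (fun x => x) false)) ∘
        (fun k => (k, dA.getD k []))) m =
      (fun m => "from " ++ m ++ " import " ++
          PySem.Str.join ", " (PySem.List.sorted
            ((pairs.filter (fun p => p.1 == m)).map Prod.snd) (fun x => x) false)) m := by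
    intro m
    simp only [Function.comp]
    have : PySem.List.sorted (dA.getD m []) (fun x => x) false =
        PySem.List.sorted ((pairs.filter (fun p => p.1 == m)).map Prod.snd)
          (fun x => x) false := by
      rw [PySem.List.sorted_id_eq_sorted_id_iff_perm]
      rw [List.perm_ext_iff_of_nodup (hnd m) (names_nodup _ (PySem.Set.nodup_ofList _) m)]
      intro n
      rw [hmem m n, names_mem]
    rw [this]
  rw [List.map_congr_left (fun m _ => hline m)]
  apply List.Perm.map
  have h1 : dA.keys.Perm (PySem.Set.ofList (pairs.map Prod.fst)) := by
    rw [List.perm_ext_iff_of_nodup hk (PySem.Set.nodup_ofList _)]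
    intro m
    rw [PySem.Set.mem_ofList, List.mem_map]
    constructor
    · intro hmk
      have hc : dA.contains m = true := (PySem.Dict.contains_iff_mem_keys _ _).mpr hmk
      obtain ⟨n, hn⟩ := List.exists_mem_of_ne_nil _ (hne m hc)
      exact ⟨(m, n), (hmem m n).mp hn, rfl⟩
    · rintro ⟨⟨m', n⟩, hmn, rfl⟩
      have hn : n ∈ dA.getD m' [] := (hmem m' n).mpr hmn
      rw [← PySem.Dict.contains_iff_mem_keys]
      by_contra hc
      rw [PySem.Dict.getD_of_not_contains dA [] (by simpa using hc)] at hn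
      exact absurd hn (List.not_mem_nil)
  exact h1.trans (PySem.List.sorted_perm _ _ _).symm
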